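-- pv_equiv track=rewrite | github.com/agrawal-prateek/codecata-hunter | pro/pro34.py | countcherry
-- ===== SOURCE A (Python) =====
-- def countcherry(l):
--     rc = 3
--     gc = 5
--     c = 0
--     for i in range(len(l) - 1):
--         if l[i] == l[i + 1]:
--             if l[i] == 'R':
--                 c += rc
--             else:
--                 c += gc
--         else:
--             continue
--     return c
-- ===== SOURCE B (Python) =====
-- def countcherry(l):
--     # Run-length decomposition: a maximal run of k equal elements contributes
--     # (k-1) * weight pairs, weight 3 for 'R' runs and 5 otherwise.
--     total = 0
--     run_key = None
--     run_len = 0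
--     for x in l:
--         if run_len and x == run_key:
--             run_len += 1
--         else:
--             if run_len:
--                 total += (run_len - 1) * (3 if run_key == 'R' else 5)
--             run_key, run_len = x, 1
--     if run_len:
--         total += (run_len - 1) * (3 if run_key == 'R' else 5)
--     return total
-- ===== Notes on version B (the rewrite author's own statement) =====
-- stated objective: alternative
-- what changed: Replaces the index-by-index adjacent-pair comparison with a single run-length pass: each maximal run of k equal elements contributes (k-1) times its weight in closed form.
import Mathlib
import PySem

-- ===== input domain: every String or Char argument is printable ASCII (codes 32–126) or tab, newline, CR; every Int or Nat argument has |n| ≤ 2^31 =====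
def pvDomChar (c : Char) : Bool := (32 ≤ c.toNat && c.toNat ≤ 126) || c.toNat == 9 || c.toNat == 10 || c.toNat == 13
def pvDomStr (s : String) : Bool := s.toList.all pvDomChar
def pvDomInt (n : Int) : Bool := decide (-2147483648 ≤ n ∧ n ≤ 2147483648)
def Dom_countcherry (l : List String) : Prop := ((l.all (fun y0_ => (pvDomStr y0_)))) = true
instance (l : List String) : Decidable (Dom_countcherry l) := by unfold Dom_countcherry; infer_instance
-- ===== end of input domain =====

-- B replaces A's index-by-index adjacent-pair scan with a run-length pass (closed-form (k-1)*weight per maximal run); same results, similar cost.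

-- ===== PORT A =====
def countcherry (l : List String) : Int :=
  let rc : Int := 3
  let gc : Int := 5
  let c : Int := 0
  (PySem.List.pyRange 0 (PySem.List.len l - 1) 1).foldl
    (fun c i =>
      if PySem.List.pyGetD l i "" == PySem.List.pyGetD l (i + 1) "" then
        if PySem.List.pyGetD l i "" == "R" then c + rc else c + gc
      else c) c

-- ===== PORT B =====
-- weight of a run key (run_key is Option String: None before the first element)
def pvW (k : Option String) : Int := if k == some "R" then 3 else 5

-- one iteration of B's loop over state (total, run_key, run_len)
def pvStep (st : Int × Option String × Nat) (x : String) : Int × Option String × Nat :=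
  match st with
  | (total, runKey, runLen) =>
    if runLen != 0 && runKey == some x then
      (total, runKey, runLen + 1)
    else
      if runLen != 0 then
        (total + ((runLen : Int) - 1) * pvW runKey, some x, 1)
      else
        (total, some x, 1)

-- the trailing 'if run_len: total += ...' after the loop
def pvFinish (st : Int × Option String × Nat) : Int :=
  match st with
  | (total, runKey, runLen) =>
    if runLen != 0 then total + ((runLen : Int) - 1) * pvW runKey else total

def countcherry_alt (l : List String) : Int :=
  pvFinish (l.foldl pvStep (0, none, 0))

-- ===== PRECONDITION & SPEC =====
def Spec_countcherry (l : List String) (out : Int) : Prop := out = countcherry_alt l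
instance (l : List String) (out : Int) : Decidable (Spec_countcherry l out) := by unfold Spec_countcherry; infer_instance

-- ===== CLAIM (what is proved, stated in full; the proofs are below) =====
def Claim_equal_countcherry : Prop := ∀ (l : List String), Dom_countcherry l → Spec_countcherry l (countcherry l)

-- ===== LEMMAS AND PROOFS =====

-- common spec: sum of weights over adjacent equal pairs, structural recursion
def pairSum : List String → Int
  | a :: b :: t => (if a == b then (if a == "R" then (3 : Int) else 5) else 0) + pairSum (b :: t)
  | _ => 0

-- per-index contribution of A's loop body
def gA (l : List String) (i : Int) : Int :=
  if PySem.List.pyGetD l i "" == PySem.List.pyGetD l (i + 1) "" then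
    (if PySem.List.pyGetD l i "" == "R" then (3 : Int) else 5)
  else 0

lemma foldlA (l : List String) (idx : List Int) (init : Int) :
    idx.foldl
      (fun c i =>
        if PySem.List.pyGetD l i "" == PySem.List.pyGetD l (i + 1) "" then
          if PySem.List.pyGetD l i "" == "R" then c + 3 else c + 5
        else c) init = init + (idx.map (gA l)).sum := by
  induction idx generalizing init with
  | nil => simp
  | cons i t ih =>
    simp only [List.foldl_cons, List.map_cons, List.sum_cons, ih, gA]
    split_ifs <;> ring

lemma sumA (l : List String) :
    ((List.range (l.length - 1)).map (fun k : Nat => gA l (k : Int))).sum = pairSum l := by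
  induction l with
  | nil => simp [pairSum]
  | cons x t ih =>
    cases t with
    | nil => simp [pairSum]
    | cons y t' =>
      have hlen : (x :: y :: t').length - 1 = t'.length + 1 := by simp
      rw [hlen, List.range_succ_eq_map]
      simp only [List.map_cons, List.map_map, List.sum_cons]
      have hcons : ∀ (a : String) (s : List String) (k : Nat),
          PySem.List.pyGetD (a :: s) ((k : Int) + 1) "" = PySem.List.pyGetD s (k : Int) "" := by
        intro a s k
        rw [show (k : Int) + 1 = ((k + 1 : Nat) : Int) by push_cast; ring,
            PySem.List.pyGetD_natCast, PySem.List.pyGetD_natCast]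
        simp [List.getD]
      have h0 : gA (x :: y :: t') (0 : Int) =
          (if x == y then (if x == "R" then (3 : Int) else 5) else 0) := by
        simp only [gA]
        rw [show ((0 : Int) + 1) = ((0 : Nat) : Int) + 1 by norm_num,
            hcons x (y :: t') 0,
            show (0 : Int) = ((0 : Nat) : Int) by norm_num]
        simp
      have hshift : ∀ k : Nat, gA (x :: y :: t') ((k + 1 : Nat) : Int) = gA (y :: t') (k : Int) := by
        intro k
        simp only [gA]
        rw [show ((k + 1 : Nat) : Int) = (k : Int) + 1 by push_cast; ring]
        rw [show ((k : Int) + 1 + 1) = ((k + 1 : Nat) : Int) + 1 by push_cast; ring]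
        rw [hcons x (y :: t') (k + 1), hcons x (y :: t') k]
        rw [show ((k + 1 : Nat) : Int) = (k : Int) + 1 by push_cast; ring]
      have : ((List.range (y :: t').length.pred).map fun k : Nat => gA (x :: y :: t') ((k + 1 : Nat) : Int)).sum
           = ((List.range ((y :: t').length - 1)).map fun k : Nat => gA (y :: t') (k : Int)).sum := by
        simp only [List.length_cons, Nat.pred_succ, Nat.add_sub_cancel]
        exact congrArg List.sum (List.map_congr_left (fun k _ => hshift k))
      simp only [List.length_cons, Nat.pred_succ] at this ⊢
      rw [show (Function.comp (fun k : Nat => gA (x :: y :: t') (k : Int)) Nat.succ)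
            = (fun k : Nat => gA (x :: y :: t') ((k + 1 : Nat) : Int)) from rfl]
      rw [this]
      rw [pairSum, ← ih]
      simp only [Nat.cast_zero] at *
      simp [h0]

lemma countcherry_eq_pairSum (l : List String) : countcherry l = pairSum l := by
  unfold countcherry
  rw [foldlA]
  rw [show PySem.List.len l = (l.length : Int) from rfl]
  rcases l with _ | ⟨x, t⟩
  · simp [pairSum, PySem.List.pyRange]
  · have : ((x :: t).length : Int) - 1 = (t.length : Nat) := by simp
    rw [this, PySem.List.pyRange_zero_nat]
    rw [show (t.length : Nat) = (x :: t).length - 1 by simp]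
    simp only [List.map_map, Function.comp_def]
    rw [sumA]
    simp

-- B-side invariant: a pending run (key, n+1) plus the rest of the input
lemma foldlB (rest : List String) : ∀ (total : Int) (key : String) (n : Nat),
    pvFinish (rest.foldl pvStep (total, some key, n + 1))
      = total + (n : Int) * pvW (some key) + pairSum (key :: rest) := by
  induction rest with
  | nil => intro total key n; simp [pvFinish, pairSum]
  | cons x t ih =>
    intro total key n
    by_cases hx : key = x
    · subst hx
      simp only [List.foldl_cons, pvStep]
      simp only [beq_self_eq_true]
      norm_num
      rw [ih]
      rw [pairSum]
      simp [pvW]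
      split_ifs <;> ring
    · have hne : (some key == some x) = false := by
        simp [hx]
      simp only [List.foldl_cons, pvStep, hne]
      norm_num
      rw [ih]
      rw [pairSum]
      have : (key == x) = false := by simp [hx]
      simp [this]

lemma countcherry_alt_eq_pairSum (l : List String) : countcherry_alt l = pairSum l := by
  rcases l with _ | ⟨x, t⟩
  · simp [countcherry_alt, pairSum, pvFinish]
  · unfold countcherry_alt
    simp only [List.foldl_cons]
    rw [show pvStep (0, none, 0) x = (0, some x, 1) from rfl]
    simpa using foldlB t 0 x 0

-- ===== VERDICT (by name: the statement is the Claim_ definition above) =====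
theorem countcherry_spec : Claim_equal_countcherry := by
  intro l _
  unfold Spec_countcherry
  rw [countcherry_eq_pairSum, countcherry_alt_eq_pairSum]
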